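-- pv_equiv track=rewrite | github.com/hahuyhungdev/StructDecipher | server/scanner/fsd.py | classify_fsd_layer
-- ===== SOURCE A (Python) =====
-- FSD_LAYERS = ("app", "processes", "pages", "widgets", "features", "entities", "shared")
--
-- def classify_fsd_layer(p: str, rel_path: str, file_data: dict) -> str:
--     """Classify a file into an FSD layer based on its path within src/."""
--     normalized = p
--     if normalized.startswith("src/"):
--         normalized = normalized[4:]
--
--     for fsd_layer in FSD_LAYERS:
--         if normalized == fsd_layer or normalized.startswith(fsd_layer + "/"):
--             return f"fsd_{fsd_layer}"
--
--     return "fsd_app"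
-- ===== SOURCE B (Python) =====
-- FSD_LAYER_SET = {"app", "processes", "pages", "widgets", "features", "entities", "shared"}
--
-- def classify_fsd_layer(p: str, rel_path: str, file_data: dict) -> str:
--     """Classify a file into an FSD layer based on its path within src/."""
--     normalized = p[4:] if p.startswith("src/") else p
--     first = normalized.partition("/")[0]
--     return f"fsd_{first}" if first in FSD_LAYER_SET else "fsd_app"
-- ===== Notes on version B (the rewrite author's own statement) =====
-- stated objective: idiomatic
-- what changed: Instead of scanning each layer and testing equality-or-prefix, B extracts the first path segment once with partition('/') and does a single set-membership lookup.
import Mathlib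
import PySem

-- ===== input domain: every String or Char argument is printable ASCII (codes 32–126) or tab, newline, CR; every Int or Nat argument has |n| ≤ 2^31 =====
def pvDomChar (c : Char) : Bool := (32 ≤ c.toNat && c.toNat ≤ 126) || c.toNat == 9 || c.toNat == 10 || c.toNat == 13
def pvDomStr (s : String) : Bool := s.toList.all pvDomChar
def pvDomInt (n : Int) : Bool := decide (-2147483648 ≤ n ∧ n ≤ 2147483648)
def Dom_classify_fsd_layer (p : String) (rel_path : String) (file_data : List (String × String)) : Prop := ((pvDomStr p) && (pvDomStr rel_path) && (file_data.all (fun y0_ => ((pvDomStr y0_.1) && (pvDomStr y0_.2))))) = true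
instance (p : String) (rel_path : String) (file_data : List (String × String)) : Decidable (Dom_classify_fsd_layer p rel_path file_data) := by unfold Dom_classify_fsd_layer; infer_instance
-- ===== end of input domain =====

-- B replaces A's per-layer equality-or-prefix scan by extracting the first path
-- segment once and doing a single set-membership lookup (objective: idiomatic).

-- ===== PORT A =====
def FSD_LAYERS : List String := ["app", "processes", "pages", "widgets", "features", "entities", "shared"]

-- the 'for fsd_layer in FSD_LAYERS: …' loop of A, with its early return
def fsdLoopA : List String → String → String
  | [], _ => "fsd_app"
  | fsd_layer :: rest, normalized =>
      if normalized == fsd_layer || PySem.Str.startswith normalized (fsd_layer ++ "/") then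
        "fsd_" ++ fsd_layer
      else fsdLoopA rest normalized

def classify_fsd_layer (p : String) (rel_path : String) (file_data : List (String × String)) : String :=
  let normalized := if PySem.Str.startswith p "src/" then PySem.Str.slice p (some 4) none else p
  fsdLoopA FSD_LAYERS normalized

-- ===== PORT B =====
def FSD_LAYER_SET : PySem.Set String :=
  PySem.Set.ofList ["app", "processes", "pages", "widgets", "features", "entities", "shared"]

def classify_fsd_layer_alt (p : String) (rel_path : String) (file_data : List (String × String)) : String :=
  let normalized := if PySem.Str.startswith p "src/" then PySem.Str.slice p (some 4) none else p
  -- normalized.partition("/")[0] = the characters before the first '/'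
  let first := String.ofList (normalized.toList.takeWhile (· ≠ '/'))
  if PySem.Set.contains FSD_LAYER_SET first then "fsd_" ++ first else "fsd_app"

-- ===== PRECONDITION & SPEC =====
def Spec_classify_fsd_layer (p : String) (rel_path : String) (file_data : List (String × String)) (out : String) : Prop := out = classify_fsd_layer_alt p rel_path file_data
instance (p : String) (rel_path : String) (file_data : List (String × String)) (out : String) : Decidable (Spec_classify_fsd_layer p rel_path file_data out) := by unfold Spec_classify_fsd_layer; infer_instance

-- ===== CLAIM (what is proved, stated in full; the proofs are below) =====
def Claim_equal_classify_fsd_layer : Prop := ∀ (p : String) (rel_path : String) (file_data : List (String × String)), Dom_classify_fsd_layer p rel_path file_data → Spec_classify_fsd_layer p rel_path file_data (classify_fsd_layer p rel_path file_data)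

-- ===== LEMMAS AND PROOFS =====

-- A's per-layer test "s == l or s.startswith(l + '/')" holds exactly when the
-- first '/'-segment of s is l, provided l itself contains no '/'.
theorem condA_eq_takeWhile (ls cs : List Char) (h : '/' ∉ ls) :
    ((cs == ls) || (ls ++ ['/']).isPrefixOf cs) = (cs.takeWhile (· ≠ '/') == ls) := by
  induction cs generalizing ls with
  | nil =>
      cases ls with
      | nil => simp
      | cons l ls' => simp
  | cons c cs' ih =>
      cases ls with
      | nil =>
          by_cases hc : c = '/'
          · simp [List.isPrefixOf, List.takeWhile, hc]
          · simp [List.isPrefixOf, List.takeWhile, hc, Ne.symm hc]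
      | cons l ls' =>
          have hl : l ≠ '/' := fun he => h (by simp [he])
          have h' : '/' ∉ ls' := fun he => h (by simp [he])
          by_cases hcl : c = l
          · subst hcl
            by_cases hc : c = '/'
            · exact absurd hc hl
            · simpa [List.isPrefixOf, List.takeWhile, hc] using ih ls' h'
          · by_cases hc : c = '/'
            · have h2 : (l == '/') = false := by simp [hl]
              simp [List.isPrefixOf_cons₂, List.takeWhile, hc, h2, Ne.symm hl]
            · have h1 : (c == l) = false := by simp [hcl]
              have h2 : (l == c) = false := by simp [Ne.symm hcl]
              simp [List.isPrefixOf_cons₂, List.takeWhile, hc, h1, h2]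

theorem string_cond_eq (s l : String) (h : '/' ∉ l.toList) :
    (s == l || PySem.Str.startswith s (l ++ "/")) =
      (s.toList.takeWhile (· ≠ '/') == l.toList) := by
  have h1 : (s == l) = (s.toList == l.toList) := by
    rw [Bool.eq_iff_iff]; simp [String.toList_inj]
  have h2 : PySem.Str.startswith s (l ++ "/") = (l.toList ++ ['/']).isPrefixOf s.toList := by
    rw [Bool.eq_iff_iff]
    simp [PySem.Chars.startswith_iff, List.isPrefixOf_iff_prefix]
  rw [h1, h2, condA_eq_takeWhile _ _ h]

theorem ofList_eq_str (t : List Char) (l : String) : (String.ofList t = l) ↔ t = l.toList := by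
  constructor
  · intro h; have := congrArg String.toList h; simpa using this
  · intro h; subst h; exact String.ofList_toList

-- the core: A's loop equals B's extract-then-lookup, for every string
theorem loop_eq (s : String) :
    fsdLoopA FSD_LAYERS s =
      (let first := String.ofList (s.toList.takeWhile (· ≠ '/'))
       if PySem.Set.contains FSD_LAYER_SET first then "fsd_" ++ first else "fsd_app") := by
  have c1 := string_cond_eq s "app" (by decide)
  have c2 := string_cond_eq s "processes" (by decide)
  have c3 := string_cond_eq s "pages" (by decide)
  have c4 := string_cond_eq s "widgets" (by decide)
  have c5 := string_cond_eq s "features" (by decide)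
  have c6 := string_cond_eq s "entities" (by decide)
  have c7 := string_cond_eq s "shared" (by decide)
  simp only [fsdLoopA, FSD_LAYERS]
  rw [c1, c2, c3, c4, c5, c6, c7]
  generalize List.takeWhile (fun x => decide (x ≠ '/')) s.toList = t
  by_cases h1 : t = ['a','p','p']
  · subst h1; decide
  by_cases h2 : t = ['p','r','o','c','e','s','s','e','s']
  · subst h2; decide
  by_cases h3 : t = ['p','a','g','e','s']
  · subst h3; decide
  by_cases h4 : t = ['w','i','d','g','e','t','s']
  · subst h4; decide
  by_cases h5 : t = ['f','e','a','t','u','r','e','s']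
  · subst h5; decide
  by_cases h6 : t = ['e','n','t','i','t','i','e','s']
  · subst h6; decide
  by_cases h7 : t = ['s','h','a','r','e','d']
  · subst h7; decide
  · simp [h1, h2, h3, h4, h5, h6, h7, FSD_LAYER_SET, ofList_eq_str]

-- ===== VERDICT (by name: the statement is the Claim_ definition above) =====
theorem classify_fsd_layer_spec : Claim_equal_classify_fsd_layer := by
  intro p rel_path file_data _
  unfold Spec_classify_fsd_layer classify_fsd_layer classify_fsd_layer_alt
  exact loop_eq _
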